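-- pv_equiv track=rewrite | github.com/vamshikrishna781/smartcity-honeypot | scripts/network_fingerprint.py | estimate_hops
-- ===== SOURCE A (Python) =====
-- def estimate_hops(ttl):
--     """Estimate network hops based on TTL"""
--     common_initial_ttls = [64, 128, 255]
--     min_hops = float('inf')
--
--     for initial_ttl in common_initial_ttls:
--         if ttl <= initial_ttl:
--             hops = initial_ttl - ttl
--             min_hops = min(min_hops, hops)
--
--     return min_hops if min_hops != float('inf') else ttl
-- ===== SOURCE B (Python) =====
-- def estimate_hops(ttl):
--     """Estimate network hops based on TTL"""
--     if ttl > 255: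
--         return ttl
--     # ceiling threshold computed arithmetically from boolean-weighted increments:
--     # 64 for ttl<=64, 128 = 64+64 for 64<ttl<=128, 255 = 64+64+127 for 128<ttl<=255
--     return 64 + 64 * (ttl > 64) + 127 * (ttl > 128) - ttl
-- ===== Notes on version B (the rewrite author's own statement) =====
-- stated objective: alternative
-- what changed: Replaced the scan with a running min and float('inf') sentinel by a branch-free arithmetic formula: the ceiling threshold is computed as 64 + 64*(ttl>64) + 127*(ttl>128) (a sum of boolean-weighted increments), no list, no accumulator, no per-threshold comparison cascade.
import Mathlib
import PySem

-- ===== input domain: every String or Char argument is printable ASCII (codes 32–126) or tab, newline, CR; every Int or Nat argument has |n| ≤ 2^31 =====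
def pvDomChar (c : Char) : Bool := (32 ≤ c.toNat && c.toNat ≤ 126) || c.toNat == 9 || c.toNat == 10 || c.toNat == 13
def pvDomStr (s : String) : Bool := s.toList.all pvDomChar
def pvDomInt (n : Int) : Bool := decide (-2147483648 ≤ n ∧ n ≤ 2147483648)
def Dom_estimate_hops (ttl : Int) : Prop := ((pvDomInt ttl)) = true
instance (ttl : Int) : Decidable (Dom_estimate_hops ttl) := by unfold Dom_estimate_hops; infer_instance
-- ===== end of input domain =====

-- B replaces the loop + running min + inf sentinel with a branch-free arithmetic formula for the ceiling threshold (alternative formulation).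


-- ===== PORT A =====
-- loop over thresholds accumulating a running min; none models float('inf')
def estimate_hops (ttl : Int) : Int :=
  let min_hops : Option Int :=
    [64, 128, 255].foldl
      (fun min_hops initial_ttl =>
        if ttl ≤ initial_ttl then
          let hops := initial_ttl - ttl
          some (match min_hops with
                | none => hops
                | some m => min m hops)
        else min_hops)
      none
  match min_hops with
  | some m => m
  | none => ttl

-- ===== PORT B =====
-- branch-free arithmetic: ceiling threshold = 64 + 64*[ttl>64] + 127*[ttl>128]
def estimate_hops_alt (ttl : Int) : Int :=
  if ttl > 255 then ttl
  else 64 + 64 * (if ttl > 64 then (1 : Int) else 0)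
         + 127 * (if ttl > 128 then (1 : Int) else 0) - ttl

-- ===== PRECONDITION & SPEC =====
def Spec_estimate_hops (ttl : Int) (out : Int) : Prop := out = estimate_hops_alt ttl
instance (ttl : Int) (out : Int) : Decidable (Spec_estimate_hops ttl out) := by unfold Spec_estimate_hops; infer_instance

-- ===== CLAIM (what is proved, stated in full; the proofs are below) =====
def Claim_equal_estimate_hops : Prop := ∀ (ttl : Int), Dom_estimate_hops ttl → Spec_estimate_hops ttl (estimate_hops ttl)

-- ===== LEMMAS AND PROOFS =====

-- ===== VERDICT (by name: the statement is the Claim_ definition above) =====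
theorem estimate_hops_spec : Claim_equal_estimate_hops := by
  intro ttl _
  unfold Spec_estimate_hops estimate_hops estimate_hops_alt
  by_cases h1 : ttl ≤ 64 <;> by_cases h2 : ttl ≤ 128 <;> by_cases h3 : ttl ≤ 255 <;> by_cases h4 : ttl > 255 <;>
    simp [List.foldl, h1, h2, h3, h4] <;> omega
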